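-- pv_equiv track=rewrite | github.com/pypi-data/pypi-mirror-385 | packages/granite-io/granite_io-0.5.2-py3-none-any.whl/granite_io/io/citations/citations.py | mark_sentence_boundaries
-- ===== SOURCE A (Python) =====
-- def mark_sentence_boundaries(
--     split_strings: list[list[str]], tag_prefix: str
-- ) -> tuple[str, int]:
--     """
--     Modify one or more input strings by inserting a tag in the form
--     ``<[prefix][number]>``
--     at the location of each sentence boundary.
--
--     :param split_strings: Input string(s), pre-split into sentences
--     :param tag_prefix: String to place before the number part of each tagged
--         sentence boundary.
--
--     :returns: List of input strings with all sentence boundaries marked.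
--     """
--     index = 0
--     result = []
--     for sentences in split_strings:
--         to_concat = []
--         for sentence in sentences:
--             to_concat.append(f"<{tag_prefix}{index}> {sentence}")
--             index += 1
--         result.append(" ".join(to_concat))
--     return result
-- ===== SOURCE B (Python) =====
-- def mark_sentence_boundaries(split_strings, tag_prefix):
--     # Prefix-sum the group lengths once, then build each group's string
--     # independently with enumerate(group, start): no counter threaded across groups.
--     starts = [0]
--     for group in split_strings:
--         starts.append(starts[-1] + len(group))
--     return [
--         " ".join(f"<{tag_prefix}{i}> {s}" for i, s in enumerate(group, start))
--         for start, group in zip(starts, split_strings)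
--     ]
-- ===== Notes on version B (the rewrite author's own statement) =====
-- stated objective: alternative
-- what changed: Replaces the single mutable counter threaded through the nested loops by a precomputed prefix-sum table of per-group start indices, then builds each group's string independently with enumerate(group, start).
import Mathlib
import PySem

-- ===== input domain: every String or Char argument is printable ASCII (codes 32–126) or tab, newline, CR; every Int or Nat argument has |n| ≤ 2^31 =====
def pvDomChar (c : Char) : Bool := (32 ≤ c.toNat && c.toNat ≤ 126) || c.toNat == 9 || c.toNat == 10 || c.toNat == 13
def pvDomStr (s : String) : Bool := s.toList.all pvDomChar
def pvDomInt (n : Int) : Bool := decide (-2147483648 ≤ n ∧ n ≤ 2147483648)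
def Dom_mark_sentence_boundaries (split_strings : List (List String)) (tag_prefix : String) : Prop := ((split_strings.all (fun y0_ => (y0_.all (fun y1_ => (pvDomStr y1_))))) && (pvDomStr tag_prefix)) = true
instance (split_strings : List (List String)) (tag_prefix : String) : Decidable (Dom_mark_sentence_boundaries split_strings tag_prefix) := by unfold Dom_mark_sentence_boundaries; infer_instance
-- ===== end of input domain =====

-- B replaces A's single counter threaded through the nested loops by a one-pass
-- prefix-sum table of group start indices plus independent per-group enumeration
-- (objective: alternative decomposition, same cost).

-- ===== PORT A =====
def mark_sentence_boundaries (split_strings : List (List String)) (tag_prefix : String) : List String :=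
  (split_strings.foldl
    (fun (st : Int × List String) sentences =>
      let inner := sentences.foldl
        (fun (st2 : Int × List String) sentence =>
          (st2.1 + 1, st2.2 ++ ["<" ++ tag_prefix ++ PySem.Int.toStr st2.1 ++ "> " ++ sentence]))
        (st.1, ([] : List String))
      (inner.1, st.2 ++ [PySem.Str.join " " inner.2]))
    ((0 : Int), ([] : List String))).2

-- ===== PORT B =====
def mark_sentence_boundaries_alt (split_strings : List (List String)) (tag_prefix : String) : List String :=
  let starts := split_strings.foldl
    (fun (acc : List Int) group => acc ++ [acc.getLast! + (group.length : Int)]) [0]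
  (starts.zip split_strings).map
    (fun p => PySem.Str.join " "
      ((PySem.List.enumerate p.2 p.1).map
        (fun q => "<" ++ tag_prefix ++ PySem.Int.toStr q.1 ++ "> " ++ q.2)))

-- ===== PRECONDITION & SPEC =====
def Spec_mark_sentence_boundaries (split_strings : List (List String)) (tag_prefix : String) (out : List String) : Prop := out = mark_sentence_boundaries_alt split_strings tag_prefix
instance (split_strings : List (List String)) (tag_prefix : String) (out : List String) : Decidable (Spec_mark_sentence_boundaries split_strings tag_prefix out) := by unfold Spec_mark_sentence_boundaries; infer_instance

-- ===== CLAIM (what is proved, stated in full; the proofs are below) =====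
def Claim_equal_mark_sentence_boundaries : Prop := ∀ (split_strings : List (List String)) (tag_prefix : String), Dom_mark_sentence_boundaries split_strings tag_prefix → Spec_mark_sentence_boundaries split_strings tag_prefix (mark_sentence_boundaries split_strings tag_prefix)

-- ===== LEMMAS AND PROOFS =====

-- the tagged string both programs build for sentence s at global index i
def pvTag (tag_prefix : String) (i : Int) (s : String) : String :=
  "<" ++ tag_prefix ++ PySem.Int.toStr i ++ "> " ++ s

-- canonical recursive form of the result starting at global index i
def pvCanon (tag_prefix : String) : List (List String) → Int → List String
  | [], _ => []
  | g :: rest, i =>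
      PySem.Str.join " " ((PySem.List.enumerate g i).map (fun q => pvTag tag_prefix q.1 q.2))
        :: pvCanon tag_prefix rest (i + g.length)

-- the tail of B's prefix-sum table after start index i
def pvScan : List (List String) → Int → List Int
  | [], _ => []
  | g :: rest, i => (i + g.length) :: pvScan rest (i + g.length)

-- A's inner loop tags the sentences of one group with consecutive indices
theorem pvInnerA (tag_prefix : String) (g : List String) :
    ∀ (i : Int) (acc : List String),
      g.foldl (fun (st2 : Int × List String) sentence =>
          (st2.1 + 1, st2.2 ++ ["<" ++ tag_prefix ++ PySem.Int.toStr st2.1 ++ "> " ++ sentence]))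
        (i, acc)
      = (i + g.length, acc ++ (PySem.List.enumerate g i).map (fun q => pvTag tag_prefix q.1 q.2)) := by
  induction g with
  | nil => intro i acc; simp [PySem.List.enumerate_nil]
  | cons s rest ih =>
      intro i acc
      simp only [List.foldl_cons, ih, PySem.List.enumerate_cons, List.map_cons, List.append_assoc,
        List.singleton_append, List.length_cons, Prod.mk.injEq, pvTag]
      exact ⟨by push_cast; ring, trivial⟩

-- A's outer loop produces the canonical form
theorem pvOuterA (tag_prefix : String) (ss : List (List String)) :
    ∀ (i : Int) (acc : List String),
      (ss.foldl
        (fun (st : Int × List String) sentences =>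
          let inner := sentences.foldl
            (fun (st2 : Int × List String) sentence =>
              (st2.1 + 1, st2.2 ++ ["<" ++ tag_prefix ++ PySem.Int.toStr st2.1 ++ "> " ++ sentence]))
            (st.1, ([] : List String))
          (inner.1, st.2 ++ [PySem.Str.join " " inner.2]))
        (i, acc)).2
      = acc ++ pvCanon tag_prefix ss i := by
  induction ss with
  | nil => intro i acc; simp [pvCanon]
  | cons g rest ih =>
      intro i acc
      have h1 := pvInnerA tag_prefix g i []
      simp only [List.foldl_cons, h1, List.nil_append, ih, pvCanon, List.append_assoc,
        List.singleton_append]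

-- B's prefix-sum fold computes pvScan
theorem pvStartsB (ss : List (List String)) :
    ∀ (pre : List Int) (i : Int),
      ss.foldl (fun (acc : List Int) group => acc ++ [acc.getLast! + (group.length : Int)])
        (pre ++ [i])
      = pre ++ i :: pvScan ss i := by
  induction ss with
  | nil => intro pre i; simp [pvScan]
  | cons g rest ih =>
      intro pre i
      have hlast : (pre ++ [i]).getLast! = i := by
        induction pre with
        | nil => rfl
        | cons a as ihp =>
            cases as with
            | nil => rfl
            | cons b bs => simpa [List.getLast!] using ihp
      simp only [List.foldl_cons, hlast, pvScan]
      have h2 := ih (pre ++ [i]) (i + (g.length : Int))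
      simp only [List.append_assoc] at h2 ⊢; exact h2

-- B's zip-map over the table is the canonical form
theorem pvZipB (tag_prefix : String) (ss : List (List String)) :
    ∀ (i : Int),
      ((i :: pvScan ss i).zip ss).map
        (fun p => PySem.Str.join " "
          ((PySem.List.enumerate p.2 p.1).map
            (fun q => "<" ++ tag_prefix ++ PySem.Int.toStr q.1 ++ "> " ++ q.2)))
      = pvCanon tag_prefix ss i := by
  induction ss with
  | nil => intro i; simp [pvCanon]
  | cons g rest ih =>
      intro i
      simp only [pvScan, List.zip_cons_cons, List.map_cons, pvCanon, ih, pvTag]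

-- ===== VERDICT (by name: the statement is the Claim_ definition above) =====
theorem mark_sentence_boundaries_spec : Claim_equal_mark_sentence_boundaries := by
  intro ss tag _
  show mark_sentence_boundaries ss tag = mark_sentence_boundaries_alt ss tag
  unfold mark_sentence_boundaries mark_sentence_boundaries_alt
  rw [pvOuterA, List.nil_append]
  have h := pvStartsB ss [] 0
  simp only [List.nil_append] at h
  rw [h, pvZipB]
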